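-- pv_equiv track=rewrite | github.com/skgndi12/algorithm_study | baekjoon/bfs/1963.py | bfs
-- ===== SOURCE A (Python) =====
-- from collections import deque
-- from typing import List, Set
--
-- def bfs(start: int, target: int, primes: Set[int]) -> int:
--     queue = deque([(start, 0)])
--     visited = set([start])
--     d = [(0, True), (0, False), (1, True), (1, False), (2, True), (2, False), (3, True), (3, False)]
--
--     while queue:
--         cur_prime, cur_repeat = queue.popleft()
--
--         if cur_prime == target:
--             return cur_repeat
--
--         for i in range(8):
--             exp_num, is_add = d[i]
--             op_num = pow(10, exp_num)
--             before = cur_prime // pow(10, exp_num + 1)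
--
--             for j in range(1, 10):
--                 if is_add:
--                     next_num = cur_prime + (op_num * j)
--                 else:
--                     next_num = cur_prime - (op_num * j)
--
--                 after = next_num // pow(10, exp_num + 1)
--
--                 if after != before:
--                     continue
--
--                 if not (1000 <= next_num < 10000):
--                     continue
--
--                 if next_num in visited:
--                     continue
--
--                 if next_num not in primes:
--                     continue
--
--                 visited.add(next_num)
--                 queue.append((next_num, cur_repeat + 1))
--
--     return -1
-- ===== SOURCE B (Python) =====
-- def bfs(start: int, target: int, primes) -> int:
--     # Level-synchronous BFS: expand whole frontiers as sets instead of a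
--     # node-by-node deque, testing adjacency pairwise against the candidate pool.
--     cand = [p for p in primes if 1000 <= p < 10000]
--
--     def adjacent(a: int, b: int) -> bool:
--         # b is obtained from a by changing exactly one decimal digit position e:
--         # the higher digits agree (equal floor division by 10**(e+1)) and the
--         # lower digits agree (difference divisible by 10**e), and a != b.
--         if a == b:
--             return False
--         for e in range(4):
--             if a // 10 ** (e + 1) == b // 10 ** (e + 1) and (a - b) % 10 ** e == 0:
--                 return True
--         return False
--
--     visited = {start}
--     frontier = {start}
--     dist = 0
--     while frontier:
--         if target in frontier:
--             return dist
--         frontier = {p for p in cand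
--                     if p not in visited and any(adjacent(f, p) for f in frontier)}
--         visited |= frontier
--         dist += 1
--     return -1
-- ===== Notes on version B (the rewrite author's own statement) =====
-- stated objective: alternative
-- what changed: Replaces the node-at-a-time deque BFS with arithmetic +/- neighbor generation (8 direction entries x 9 digit offsets per node) by a level-synchronous BFS that expands whole frontier sets at once, selecting the next frontier by filtering the pre-restricted candidate pool with a pairwise one-digit-differs adjacency test.
import Mathlib
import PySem

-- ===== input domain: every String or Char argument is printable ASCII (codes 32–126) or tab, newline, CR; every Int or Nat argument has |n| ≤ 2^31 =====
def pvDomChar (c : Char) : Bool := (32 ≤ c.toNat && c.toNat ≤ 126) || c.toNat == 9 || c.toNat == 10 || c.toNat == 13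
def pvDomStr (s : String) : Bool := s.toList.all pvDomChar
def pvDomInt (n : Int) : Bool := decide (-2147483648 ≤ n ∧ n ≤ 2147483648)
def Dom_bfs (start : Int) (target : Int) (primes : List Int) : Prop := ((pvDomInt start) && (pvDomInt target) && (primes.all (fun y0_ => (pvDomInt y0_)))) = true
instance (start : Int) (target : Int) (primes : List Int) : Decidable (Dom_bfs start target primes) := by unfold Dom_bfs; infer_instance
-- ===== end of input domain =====

-- B replaces A's deque-of-nodes BFS (arithmetic ± neighbor generation per popped node) by a
-- level-synchronous BFS over frontier sets with a pairwise one-digit adjacency test; same return value.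

-- ===== PORT A =====
-- the table d of (exponent, is_add) pairs
def dTable : List (Nat × Bool) :=
  [(0, true), (0, false), (1, true), (1, false), (2, true), (2, false), (3, true), (3, false)]

-- body of the inner 'for j in range(1, 10)' loop
def pushA (primes : List Int) (curPrime curRepeat : Int) (di : Nat × Bool)
    (s : List (Int × Int) × PySem.Set Int) (j : Int) : List (Int × Int) × PySem.Set Int :=
  let opNum : Int := 10 ^ di.1
  let before := PySem.Int.floordiv curPrime (10 ^ (di.1 + 1))
  let nextNum := if di.2 then curPrime + opNum * j else curPrime - opNum * j
  let after := PySem.Int.floordiv nextNum (10 ^ (di.1 + 1))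
  if after ≠ before then s
  else if ¬ (1000 ≤ nextNum ∧ nextNum < 10000) then s
  else if nextNum ∈ s.2 then s
  else if nextNum ∉ primes then s
  else (s.1 ++ [(nextNum, curRepeat + 1)], PySem.Set.add s.2 nextNum)

-- one entry of the 'for i in range(8)' loop
def stepA (primes : List Int) (curPrime curRepeat : Int)
    (s : List (Int × Int) × PySem.Set Int) (di : Nat × Bool) : List (Int × Int) × PySem.Set Int :=
  (PySem.List.pyRange 1 10 1).foldl (pushA primes curPrime curRepeat di) s

-- the 'while queue' loop (fuel bounds the iteration count: pops ≤ 1 + pushes ≤ 1 + |primes|)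
def bfsGo (target : Int) (primes : List Int) : Nat → List (Int × Int) → PySem.Set Int → Int
  | 0, _, _ => -1
  | _ + 1, [], _ => -1
  | fuel + 1, (curPrime, curRepeat) :: qs, visited =>
    if curPrime = target then curRepeat
    else
      let s := dTable.foldl (stepA primes curPrime curRepeat) (qs, visited)
      bfsGo target primes fuel s.1 s.2

def bfs (start : Int) (target : Int) (primes : List Int) : Int :=
  bfsGo target primes (primes.length + 2) [(start, 0)] (PySem.Set.ofList [start])

-- ===== PORT B =====
def adjacentB (a b : Int) : Bool :=
  if a = b then false
  else (List.range 4).any (fun e =>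
    (PySem.Int.floordiv a (10 ^ (e + 1)) == PySem.Int.floordiv b (10 ^ (e + 1))) &&
    (PySem.Int.mod (a - b) (10 ^ e) == 0))

-- the 'while frontier' loop (fuel bounds the number of levels)
def bfsAltGo (target : Int) (cand : List Int) : Nat → PySem.Set Int → PySem.Set Int → Int → Int
  | 0, _, _, _ => -1
  | fuel + 1, visited, frontier, dist =>
    if frontier.isEmpty then -1
    else if target ∈ frontier then dist
    else
      let f' : PySem.Set Int := PySem.Set.ofList (cand.filter (fun p =>
        !(PySem.Set.contains visited p) && frontier.any (fun f => adjacentB f p)))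
      bfsAltGo target cand fuel (PySem.Set.union visited f') f' (dist + 1)

def bfs_alt (start : Int) (target : Int) (primes : List Int) : Int :=
  let cand := primes.filter (fun p => decide (1000 ≤ p) && decide (p < 10000))
  bfsAltGo target cand (primes.length + 3) (PySem.Set.ofList [start]) (PySem.Set.ofList [start]) 0

-- ===== PRECONDITION & SPEC =====
def Spec_bfs (start : Int) (target : Int) (primes : List Int) (out : Int) : Prop := out = bfs_alt start target primes
instance (start : Int) (target : Int) (primes : List Int) (out : Int) : Decidable (Spec_bfs start target primes out) := by unfold Spec_bfs; infer_instance

-- ===== CLAIM (what is proved, stated in full; the proofs are below) =====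
def Claim_equal_bfs : Prop := ∀ (start : Int) (target : Int) (primes : List Int), Dom_bfs start target primes → Spec_bfs start target primes (bfs start target primes)

-- ===== LEMMAS AND PROOFS =====

-- b arises from a by changing exactly one decimal digit position e < 4
-- (higher digits agree: equal floor division by 10^(e+1); lower digits agree: 10^e divides a - b)
def EdgePure (a b : Int) : Prop :=
  a ≠ b ∧ ∃ e : Nat, e < 4 ∧
    PySem.Int.floordiv a (10 ^ (e + 1)) = PySem.Int.floordiv b (10 ^ (e + 1)) ∧
    ((10 : Int) ^ e) ∣ (a - b)

def nextOf (cur : Int) (di : Nat × Bool) (j : Int) : Int :=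
  if di.2 then cur + 10 ^ di.1 * j else cur - 10 ^ di.1 * j

-- "b is generated (and passes the pure checks) by some (d-entry, j) pair of A's inner loops"
def genClause (cur b : Int) (L : List (Nat × Bool)) : Prop :=
  ∃ di ∈ L, ∃ j ∈ PySem.List.pyRange 1 10 1, b = nextOf cur di j ∧
    PySem.Int.floordiv b (10 ^ (di.1 + 1)) = PySem.Int.floordiv cur (10 ^ (di.1 + 1)) ∧
    1000 ≤ b ∧ b < 10000

-- number of candidates not yet visited (drives both fuel bounds)
def unseenN (cand V : List Int) : Nat := (cand.toFinset \ V.toFinset).card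

lemma adjacentB_iff (a b : Int) : adjacentB a b = true ↔ EdgePure a b := by
  unfold adjacentB EdgePure
  by_cases hab : a = b
  · simp [hab]
  · simp only [if_neg hab, List.any_eq_true, List.mem_range, Bool.and_eq_true, beq_iff_eq]
    constructor
    · rintro ⟨e, he, h1, h2⟩
      exact ⟨hab, e, he, h1, (PySem.Int.mod_eq_zero_iff_dvd _ _).mp h2⟩
    · rintro ⟨-, e, he, h1, h2⟩
      exact ⟨e, he, h1, (PySem.Int.mod_eq_zero_iff_dvd _ _).mpr h2⟩

lemma genClause_iff (cur b : Int) :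
    genClause cur b dTable ↔ (1000 ≤ b ∧ b < 10000 ∧ EdgePure cur b) := by
  unfold genClause EdgePure
  constructor
  · rintro ⟨di, hdi, j, hj, hb, hfl, h1, h2⟩
    rw [PySem.List.mem_pyRange_one] at hj
    have he : di.1 < 4 := by fin_cases hdi <;> decide
    have hpow : (0 : Int) < 10 ^ di.1 := by positivity
    refine ⟨h1, h2, ?_, di.1, he, hfl.symm, ?_⟩
    · rcases hj with ⟨hj1, hj2⟩
      obtain ⟨e, ad⟩ := di
      cases ad <;> simp only [nextOf, if_true, Bool.false_eq_true, if_false] at hb <;>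
        subst hb <;> simp only at hpow <;> nlinarith
    · obtain ⟨e, ad⟩ := di
      cases ad <;> simp only [nextOf, if_true, Bool.false_eq_true, if_false] at hb <;> subst hb
      · exact ⟨j, by ring⟩
      · exact ⟨-j, by ring⟩
  · rintro ⟨h1, h2, hab, e, he, hfl, c, hc⟩
    have hpow : (0 : Int) < 10 ^ e := by positivity
    have hpow1 : (0 : Int) < 10 ^ (e + 1) := by positivity
    have hb1 := (PySem.Int.floordiv_eq_iff_of_pos (q := PySem.Int.floordiv b (10 ^ (e+1))) hpow1).mp rfl
    have ha1 := (PySem.Int.floordiv_eq_iff_of_pos (q := PySem.Int.floordiv b (10 ^ (e+1))) hpow1).mp hfl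
    have hM : (10 : Int) ^ (e + 1) = 10 ^ e * 10 := by ring
    have hdiff : -(10 ^ e * 10) < cur - b ∧ cur - b < 10 ^ e * 10 := by
      constructor <;> nlinarith [ha1.1, ha1.2, hb1.1, hb1.2]
    have hc0 : c ≠ 0 := by rintro rfl; apply hab; omega
    have hcb : -10 < c ∧ c < 10 := by
      rw [hc] at hdiff
      constructor <;> nlinarith
    rcases lt_or_gt_of_ne hc0 with hneg | hpos
    · refine ⟨(e, true), ?_, -c, ?_, ?_, hfl.symm, h1, h2⟩
      · interval_cases e <;> simp [dTable]
      · rw [PySem.List.mem_pyRange_one]; omega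
      · show b = cur + 10 ^ e * (-c)
        linear_combination -hc
    · refine ⟨(e, false), ?_, c, ?_, ?_, hfl.symm, h1, h2⟩
      · interval_cases e <;> simp [dTable]
      · rw [PySem.List.mem_pyRange_one]; omega
      · show b = cur - 10 ^ e * c
        linear_combination -hc

lemma pushA_hit (primes : List Int) (cur rep : Int) (di : Nat × Bool) (q : List (Int × Int))
    (V : List Int) (j : Int)
    (hfl : PySem.Int.floordiv (nextOf cur di j) (10 ^ (di.1 + 1)) = PySem.Int.floordiv cur (10 ^ (di.1 + 1)))
    (hr : 1000 ≤ nextOf cur di j ∧ nextOf cur di j < 10000)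
    (hv : nextOf cur di j ∉ V) (hp : nextOf cur di j ∈ primes) :
    pushA primes cur rep di (q, V) j = (q ++ [(nextOf cur di j, rep + 1)], V ++ [nextOf cur di j]) := by
  unfold pushA
  simp only [nextOf] at hfl hr hv hp ⊢
  rw [if_neg (by simpa using hfl), if_neg (by simpa using hr), if_neg (by simpa using hv),
    if_neg (by simpa using hp)]
  have : PySem.Set.add V (if di.2 then cur + 10 ^ di.1 * j else cur - 10 ^ di.1 * j)
      = V ++ [if di.2 then cur + 10 ^ di.1 * j else cur - 10 ^ di.1 * j] := by
    unfold PySem.Set.add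
    rw [if_neg (by simpa [PySem.Set.contains_iff] using hv)]
  simp [this]

lemma pushA_miss (primes : List Int) (cur rep : Int) (di : Nat × Bool) (q : List (Int × Int))
    (V : List Int) (j : Int)
    (h : ¬ (PySem.Int.floordiv (nextOf cur di j) (10 ^ (di.1 + 1)) = PySem.Int.floordiv cur (10 ^ (di.1 + 1))
        ∧ 1000 ≤ nextOf cur di j ∧ nextOf cur di j < 10000
        ∧ nextOf cur di j ∉ V ∧ nextOf cur di j ∈ primes)) :
    pushA primes cur rep di (q, V) j = (q, V) := by
  unfold pushA
  simp only [nextOf] at h ⊢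
  by_cases h1 : PySem.Int.floordiv (if di.2 then cur + 10 ^ di.1 * j else cur - 10 ^ di.1 * j) (10 ^ (di.1 + 1))
      = PySem.Int.floordiv cur (10 ^ (di.1 + 1))
  · rw [if_neg (by simpa using h1)]
    by_cases h2 : 1000 ≤ (if di.2 then cur + 10 ^ di.1 * j else cur - 10 ^ di.1 * j)
        ∧ (if di.2 then cur + 10 ^ di.1 * j else cur - 10 ^ di.1 * j) < 10000
    · rw [if_neg (by simpa using h2)]
      by_cases h3 : (if di.2 then cur + 10 ^ di.1 * j else cur - 10 ^ di.1 * j) ∈ V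
      · rw [if_pos h3]
      · rw [if_neg h3, if_pos (by tauto)]
    · rw [if_pos (by simpa using h2)]
  · rw [if_pos (by simpa using h1)]

lemma pushA_fold_spec (primes : List Int) (cur rep : Int) (di : Nat × Bool) (js : List Int) :
    ∀ (q : List (Int × Int)) (V : List Int),
    ∃ ds : List Int,
      js.foldl (pushA primes cur rep di) (q, V) = (q ++ ds.map (fun n => (n, rep + 1)), V ++ ds) ∧
      ds.Nodup ∧
      ∀ b, b ∈ ds ↔ ((∃ j ∈ js, b = nextOf cur di j ∧
          PySem.Int.floordiv b (10 ^ (di.1 + 1)) = PySem.Int.floordiv cur (10 ^ (di.1 + 1)) ∧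
          1000 ≤ b ∧ b < 10000) ∧ b ∈ primes ∧ b ∉ V) := by
  induction js with
  | nil => intro q V; exact ⟨[], by simp, by simp, by simp⟩
  | cons j js ih =>
    intro q V
    by_cases hall : PySem.Int.floordiv (nextOf cur di j) (10 ^ (di.1 + 1)) = PySem.Int.floordiv cur (10 ^ (di.1 + 1))
        ∧ 1000 ≤ nextOf cur di j ∧ nextOf cur di j < 10000
        ∧ nextOf cur di j ∉ V ∧ nextOf cur di j ∈ primes
    · obtain ⟨hfl, hr1, hr2, hv, hp⟩ := hall
      obtain ⟨ds', heq, hnd, hmem⟩ := ih (q ++ [(nextOf cur di j, rep + 1)]) (V ++ [nextOf cur di j])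
      refine ⟨nextOf cur di j :: ds', ?_, ?_, ?_⟩
      · rw [List.foldl_cons, pushA_hit primes cur rep di q V j hfl ⟨hr1, hr2⟩ hv hp, heq]
        simp
      · refine List.nodup_cons.mpr ⟨fun hmem' => ?_, hnd⟩
        have := (hmem _).mp hmem'
        simp at this
      · intro b
        constructor
        · intro hb
          rcases List.mem_cons.mp hb with rfl | hb'
          · exact ⟨⟨j, List.mem_cons_self .., rfl, hfl, hr1, hr2⟩, hp, hv⟩
          · obtain ⟨⟨j', hj', hcl⟩, hp', hv'⟩ := (hmem b).mp hb'
            exact ⟨⟨j', List.mem_cons_of_mem _ hj', hcl⟩, hp', fun hbV => hv' (List.mem_append_left _ hbV)⟩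
        · rintro ⟨⟨j', hj', hbj, hcl⟩, hp', hv'⟩
          by_cases hbn : b = nextOf cur di j
          · exact List.mem_cons.mpr (Or.inl hbn)
          · refine List.mem_cons.mpr (Or.inr ((hmem b).mpr ⟨⟨j', ?_, hbj, hcl⟩, hp', ?_⟩))
            · rcases List.mem_cons.mp hj' with rfl | h
              · exact absurd hbj hbn
              · exact h
            · simp [hv', hbn]
    · obtain ⟨ds', heq, hnd, hmem⟩ := ih q V
      refine ⟨ds', ?_, hnd, ?_⟩
      · rw [List.foldl_cons, pushA_miss primes cur rep di q V j hall, heq]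
      · intro b
        rw [hmem b]
        constructor
        · rintro ⟨⟨j', hj', hcl⟩, hp', hv'⟩
          exact ⟨⟨j', List.mem_cons_of_mem _ hj', hcl⟩, hp', hv'⟩
        · rintro ⟨⟨j', hj', hbj, hcl⟩, hp', hv'⟩
          rcases List.mem_cons.mp hj' with rfl | h
          · subst hbj; exact absurd ⟨hcl.1, hcl.2.1, hcl.2.2, hv', hp'⟩ hall
          · exact ⟨⟨j', h, hbj, hcl⟩, hp', hv'⟩

lemma genClause_cons (cur b : Int) (di : Nat × Bool) (L : List (Nat × Bool)) :
    genClause cur b (di :: L) ↔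
      ((∃ j ∈ PySem.List.pyRange 1 10 1, b = nextOf cur di j ∧
          PySem.Int.floordiv b (10 ^ (di.1 + 1)) = PySem.Int.floordiv cur (10 ^ (di.1 + 1)) ∧
          1000 ≤ b ∧ b < 10000) ∨ genClause cur b L) := by
  unfold genClause
  exact List.exists_mem_cons_iff _ _ _

lemma stepA_fold_spec (primes : List Int) (cur rep : Int) (L : List (Nat × Bool)) :
    ∀ (q : List (Int × Int)) (V : List Int),
    ∃ ds : List Int,
      L.foldl (stepA primes cur rep) (q, V) = (q ++ ds.map (fun n => (n, rep + 1)), V ++ ds) ∧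
      ds.Nodup ∧
      ∀ b, b ∈ ds ↔ (genClause cur b L ∧ b ∈ primes ∧ b ∉ V) := by
  induction L with
  | nil => intro q V; exact ⟨[], by simp, by simp, by simp [genClause]⟩
  | cons di L ih =>
    intro q V
    obtain ⟨ds1, heq1, hnd1, hmem1⟩ := pushA_fold_spec primes cur rep di (PySem.List.pyRange 1 10 1) q V
    obtain ⟨ds2, heq2, hnd2, hmem2⟩ := ih (q ++ ds1.map (fun n => (n, rep + 1))) (V ++ ds1)
    refine ⟨ds1 ++ ds2, ?_, ?_, ?_⟩
    · rw [List.foldl_cons]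
      show List.foldl _ (stepA primes cur rep (q, V) di) L = _
      rw [show stepA primes cur rep (q, V) di = (q ++ ds1.map (fun n => (n, rep + 1)), V ++ ds1) from heq1,
        heq2]
      simp [List.append_assoc]
    · refine List.nodup_append.mpr ⟨hnd1, hnd2, ?_⟩
      intro a ha b hb hab
      subst hab
      exact ((hmem2 a).mp hb).2.2 (List.mem_append_right _ ha)
    · intro b
      rw [List.mem_append, genClause_cons]
      constructor
      · rintro (hb1 | hb2)
        · obtain ⟨hcl, hp, hv⟩ := (hmem1 b).mp hb1
          exact ⟨Or.inl hcl, hp, hv⟩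
        · obtain ⟨hcl, hp, hv⟩ := (hmem2 b).mp hb2
          exact ⟨Or.inr hcl, hp, fun h => hv (List.mem_append_left _ h)⟩
      · rintro ⟨hcl | hcl, hp, hv⟩
        · exact Or.inl ((hmem1 b).mpr ⟨hcl, hp, hv⟩)
        · by_cases hb1 : b ∈ ds1
          · exact Or.inl hb1
          · exact Or.inr ((hmem2 b).mpr ⟨hcl, hp, by simp [hv, hb1]⟩)

lemma unseen_append (cand V ds : List Int) (h1 : ∀ b ∈ ds, b ∈ cand) (h2 : ∀ b ∈ ds, b ∉ V)
    (h3 : ds.Nodup) : unseenN cand (V ++ ds) + ds.length = unseenN cand V := by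
  unfold unseenN
  have hset : cand.toFinset \ (V ++ ds).toFinset = (cand.toFinset \ V.toFinset) \ ds.toFinset := by
    ext x; simp; tauto
  have hsub : ds.toFinset ⊆ cand.toFinset \ V.toFinset := by
    intro x hx
    simp only [List.mem_toFinset] at hx
    simp only [Finset.mem_sdiff, List.mem_toFinset]
    exact ⟨h1 x hx, h2 x hx⟩
  rw [hset, Finset.card_sdiff]
  have hinter : ds.toFinset ∩ (cand.toFinset \ V.toFinset) = ds.toFinset :=
    Finset.inter_eq_left.mpr hsub
  rw [hinter, List.toFinset_card_of_nodup h3]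
  have := Finset.card_le_card hsub
  rw [List.toFinset_card_of_nodup h3] at this
  omega

lemma unseen_union_le (cand VB f' : List Int) (hsub : ∀ b ∈ f', b ∈ cand ∧ b ∉ VB)
    (hne : f' ≠ []) : unseenN cand (PySem.Set.union VB f') + 1 ≤ unseenN cand VB := by
  unfold unseenN
  have hmem : ∀ z : Int, z ∈ PySem.Set.union VB f' ↔ z ∈ VB ∨ z ∈ f' := fun z =>
    PySem.Set.mem_union VB f' z
  obtain ⟨x, hx⟩ := List.exists_mem_of_ne_nil f' hne
  have hss : cand.toFinset \ (PySem.Set.union VB f').toFinset ⊂ cand.toFinset \ VB.toFinset := by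
    constructor
    · intro z hz
      simp only [Finset.mem_sdiff, List.mem_toFinset] at hz ⊢
      exact ⟨hz.1, fun h => hz.2 ((hmem z).mpr (Or.inl h))⟩
    · intro hcon
      have hxin : x ∈ cand.toFinset \ VB.toFinset := by
        simp only [Finset.mem_sdiff, List.mem_toFinset]
        exact (hsub x hx)
      have := hcon hxin
      simp only [Finset.mem_sdiff, List.mem_toFinset] at this
      exact this.2 ((hmem x).mpr (Or.inr hx))
  have := Finset.card_lt_card hss
  omega

lemma unseen_le_length (cand V : List Int) : unseenN cand V ≤ cand.length := by
  unfold unseenN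
  calc (cand.toFinset \ V.toFinset).card ≤ cand.toFinset.card :=
        Finset.card_le_card (Finset.sdiff_subset)
    _ ≤ cand.length := List.toFinset_card_le cand

lemma bfsAltGo_found (target : Int) (cand : List Int) (fuel : Nat) (visited frontier : PySem.Set Int)
    (dist : Int) (h1 : frontier.isEmpty = false) (h2 : target ∈ frontier) :
    bfsAltGo target cand (fuel + 1) visited frontier dist = dist := by
  simp [bfsAltGo, h1, h2]

lemma bfsAltGo_step (target : Int) (cand : List Int) (fuel : Nat) (visited frontier : PySem.Set Int)
    (dist : Int) (h1 : frontier.isEmpty = false) (h2 : target ∉ frontier) :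
    bfsAltGo target cand (fuel + 1) visited frontier dist
      = bfsAltGo target cand fuel
          (PySem.Set.union visited (PySem.Set.ofList (cand.filter (fun p =>
            !(PySem.Set.contains visited p) && frontier.any (fun f => adjacentB f p)))))
          (PySem.Set.ofList (cand.filter (fun p =>
            !(PySem.Set.contains visited p) && frontier.any (fun f => adjacentB f p)))) (dist + 1) := by
  simp [bfsAltGo, h1, h2]

-- one BFS level: A pops the remaining nodes n1 of the current level (m already processed,
-- q2 = the part of the next level generated so far) while B still sits at frontier F
lemma midlevel_inner (target : Int) (primes cand : List Int)
    (hcand : ∀ b, b ∈ cand ↔ (b ∈ primes ∧ 1000 ≤ b ∧ b < 10000)) (fb : Nat)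
    (ihB : ∀ (fuelA : Nat) (n1 m q2 VA VB F : List Int) (d : Int),
      (∀ z, z ∈ F ↔ (z ∈ m ∨ z ∈ n1)) →
      n1.Nodup →
      (∀ z, z ∈ VA ↔ (z ∈ VB ∨ z ∈ q2)) →
      q2.Nodup →
      (∀ b, b ∈ q2 ↔ (b ∈ cand ∧ b ∉ VB ∧ ∃ a ∈ m, EdgePure a b)) →
      (∀ z ∈ F, z ∈ VB) →
      target ∉ m →
      (target ∈ VB → target ∈ F) →
      unseenN cand VA + n1.length + q2.length + 1 ≤ fuelA →
      1 ≤ fb →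
      (F ≠ [] → unseenN cand VB + 2 ≤ fb) →
      bfsGo target primes fuelA (n1.map (fun z => (z, d)) ++ q2.map (fun z => (z, d + 1))) VA
        = bfsAltGo target cand fb VB F d) :
    ∀ (n1 : List Int) (m q2 VA : List Int) (fuelA : Nat) (VB F : List Int) (d : Int),
    (∀ z, z ∈ F ↔ (z ∈ m ∨ z ∈ n1)) →
    n1.Nodup →
    (∀ z, z ∈ VA ↔ (z ∈ VB ∨ z ∈ q2)) →
    q2.Nodup →
    (∀ b, b ∈ q2 ↔ (b ∈ cand ∧ b ∉ VB ∧ ∃ a ∈ m, EdgePure a b)) →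
    (∀ z ∈ F, z ∈ VB) →
    target ∉ m →
    (target ∈ VB → target ∈ F) →
    unseenN cand VA + n1.length + q2.length + 1 ≤ fuelA →
    (F ≠ [] → unseenN cand VB + 2 ≤ fb + 1) →
    bfsGo target primes fuelA (n1.map (fun z => (z, d)) ++ q2.map (fun z => (z, d + 1))) VA
      = bfsAltGo target cand (fb + 1) VB F d := by
  intro n1
  induction n1 with
  | nil =>
    intro m q2 VA fuelA VB F d hF hnd1 hVA hndq2 hq2 hFV htm htVB hfA hfB2
    by_cases hFnil : F = []
    · subst hFnil
      have hmnil : ∀ z, z ∉ m := fun z hz => by simpa using (hF z).mpr (Or.inl hz)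
      have hq2nil : q2 = [] := by
        rw [List.eq_nil_iff_forall_not_mem]
        intro b hb
        obtain ⟨-, -, a, ha, -⟩ := (hq2 b).mp hb
        exact hmnil a ha
      subst hq2nil
      cases fuelA <;> simp [bfsGo, bfsAltGo]
    · have hFe : F.isEmpty = false := by
        cases hc : F with
        | nil => exact absurd hc hFnil
        | cons a t => rfl
      have htF : target ∉ F := by
        intro hT
        rcases (hF target).mp hT with h | h
        · exact htm h
        · simp at h
      -- B takes one level step
      have hBstep : bfsAltGo target cand (fb + 1) VB F d
          = bfsAltGo target cand fb
              (PySem.Set.union VB (PySem.Set.ofList (cand.filter (fun p =>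
                !(PySem.Set.contains VB p) && F.any (fun f => adjacentB f p)))))
              (PySem.Set.ofList (cand.filter (fun p =>
                !(PySem.Set.contains VB p) && F.any (fun f => adjacentB f p)))) (d + 1) := by
        exact bfsAltGo_step target cand fb VB F d hFe htF
      set f' : List Int := PySem.Set.ofList (cand.filter (fun p =>
        !(PySem.Set.contains VB p) && F.any (fun f => adjacentB f p))) with hf'def
      have hmemf' : ∀ b, b ∈ f' ↔ (b ∈ cand ∧ b ∉ VB ∧ ∃ a ∈ F, EdgePure a b) := by
        intro b
        rw [hf'def, PySem.Set.mem_ofList, List.mem_filter]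
        simp only [Bool.and_eq_true, Bool.not_eq_true', List.any_eq_true]
        constructor
        · rintro ⟨hc, hnv, a, ha, hadj⟩
          exact ⟨hc, by simpa [PySem.Set.contains_iff] using hnv,
            a, ha, (adjacentB_iff a b).mp hadj⟩
        · rintro ⟨hc, hnv, a, ha, hE⟩
          refine ⟨hc, ?_, a, ha, (adjacentB_iff a b).mpr hE⟩
          rcases h : PySem.Set.contains VB b with _ | _
          · rfl
          · exact absurd ((PySem.Set.contains_iff VB b).mp h) hnv
      have hq2f' : ∀ z, z ∈ q2 ↔ z ∈ f' := by
        intro z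
        rw [hq2 z, hmemf' z]
        constructor
        · rintro ⟨hc, hnv, a, ha, hE⟩
          exact ⟨hc, hnv, a, (hF a).mpr (Or.inl ha), hE⟩
        · rintro ⟨hc, hnv, a, ha, hE⟩
          rcases (hF a).mp ha with h | h
          · exact ⟨hc, hnv, a, h, hE⟩
          · simp at h
      have hfb1 : unseenN cand VB + 2 ≤ fb + 1 := hfB2 hFnil
      rw [hBstep]
      have hA := ihB fuelA q2 [] [] VA
        (PySem.Set.union VB f') f' (d + 1)
        (fun z => by simpa using (hq2f' z).symm)
        hndq2
        (fun z => by
          rw [hVA z, PySem.Set.mem_union]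
          simp [hq2f' z])
        List.nodup_nil
        (fun b => by simp)
        (fun z hz => (PySem.Set.mem_union VB f' z).mpr (Or.inr hz))
        (by simp)
        (fun hT => by
          rcases (PySem.Set.mem_union VB f' target).mp hT with h | h
          · exact absurd (htVB h) htF
          · exact h)
        (by simpa using hfA)
        (by omega)
        (fun hf'ne => by
          have := unseen_union_le cand VB f'
            (fun b hb => ⟨((hmemf' b).mp hb).1, ((hmemf' b).mp hb).2.1⟩) hf'ne
          omega)
      simpa using hA
  | cons x rest ih =>
    intro m q2 VA fuelA VB F d hF hnd1 hVA hndq2 hq2 hFV htm htVB hfA hfB2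
    have hxF : x ∈ F := (hF x).mpr (Or.inr (List.mem_cons_self ..))
    have hFnil : F ≠ [] := fun h => by simp [h] at hxF
    have hFe : F.isEmpty = false := by
      cases hc : F with
      | nil => exact absurd hc hFnil
      | cons a t => rfl
    obtain ⟨fa, rfl⟩ : ∃ fa, fuelA = fa + 1 := by
      cases fuelA with
      | zero => omega
      | succ n => exact ⟨n, rfl⟩
    by_cases hxt : x = target
    · subst hxt
      rw [bfsAltGo_found x cand fb VB F d hFe hxF]
      simp [bfsGo]
    · -- A pops x and pushes its unvisited prime neighbors
      obtain ⟨ds, heq, hnd, hmem⟩ := stepA_fold_spec primes x d dTable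
        (rest.map (fun z => (z, d)) ++ q2.map (fun z => (z, d + 1))) VA
      have hds : ∀ b, b ∈ ds ↔ (b ∈ cand ∧ EdgePure x b ∧ b ∉ VA) := by
        intro b
        rw [hmem b, genClause_iff, hcand b]
        tauto
      have hxVA : x ∈ VA := (hVA x).mpr (Or.inl (hFV x hxF))
      have hAstep : bfsGo target primes (fa + 1)
          ((x :: rest).map (fun z => (z, d)) ++ q2.map (fun z => (z, d + 1))) VA
          = bfsGo target primes fa
              (rest.map (fun z => (z, d)) ++ (q2 ++ ds).map (fun z => (z, d + 1))) (VA ++ ds) := by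
        simp only [List.map_cons, List.cons_append, bfsGo, if_neg hxt]
        rw [heq]
        simp [List.append_assoc]
      rw [hAstep]
      refine ih (x :: m) (q2 ++ ds) (VA ++ ds) fa VB F d ?_ ?_ ?_ ?_ ?_ hFV ?_ htVB ?_ hfB2
      · intro z
        rw [hF z]
        simp only [List.mem_cons]
        tauto
      · exact (List.nodup_cons.mp hnd1).2
      · intro z
        simp only [List.mem_append, hVA z]
        tauto
      · refine List.nodup_append.mpr ⟨hndq2, hnd, ?_⟩
        intro a ha b hb hab
        subst hab
        exact ((hds a).mp hb).2.2 ((hVA a).mpr (Or.inr ha))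
      · intro b
        simp only [List.mem_append, List.mem_cons]
        constructor
        · rintro (hb | hb)
          · obtain ⟨hc, hnv, a, ha, hE⟩ := (hq2 b).mp hb
            exact ⟨hc, hnv, a, Or.inr ha, hE⟩
          · obtain ⟨hc, hE, hnva⟩ := (hds b).mp hb
            refine ⟨hc, fun h => hnva ((hVA b).mpr (Or.inl h)), x, Or.inl rfl, hE⟩
        · rintro ⟨hc, hnv, a, rfl | ha, hE⟩
          · by_cases hbq : b ∈ q2
            · exact Or.inl hbq
            · exact Or.inr ((hds b).mpr ⟨hc, hE, fun h => by
                rcases (hVA b).mp h with h' | h'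
                · exact hnv h'
                · exact hbq h'⟩)
          · exact Or.inl ((hq2 b).mpr ⟨hc, hnv, a, ha, hE⟩)
      · simp only [List.mem_cons, not_or]
        exact ⟨fun h => hxt h.symm, htm⟩
      · have hun : unseenN cand (VA ++ ds) + ds.length = unseenN cand VA :=
          unseen_append cand VA ds (fun b hb => ((hds b).mp hb).1)
            (fun b hb => ((hds b).mp hb).2.2) hnd
        simp only [List.length_append, List.length_cons] at hfA ⊢
        omega

lemma midlevel (target : Int) (primes cand : List Int)
    (hcand : ∀ b, b ∈ cand ↔ (b ∈ primes ∧ 1000 ≤ b ∧ b < 10000)) :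
    ∀ (fuelB fuelA : Nat) (n1 m q2 VA VB F : List Int) (d : Int),
    (∀ z, z ∈ F ↔ (z ∈ m ∨ z ∈ n1)) →
    n1.Nodup →
    (∀ z, z ∈ VA ↔ (z ∈ VB ∨ z ∈ q2)) →
    q2.Nodup →
    (∀ b, b ∈ q2 ↔ (b ∈ cand ∧ b ∉ VB ∧ ∃ a ∈ m, EdgePure a b)) →
    (∀ z ∈ F, z ∈ VB) →
    target ∉ m →
    (target ∈ VB → target ∈ F) →
    unseenN cand VA + n1.length + q2.length + 1 ≤ fuelA →
    1 ≤ fuelB →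
    (F ≠ [] → unseenN cand VB + 2 ≤ fuelB) →
    bfsGo target primes fuelA (n1.map (fun z => (z, d)) ++ q2.map (fun z => (z, d + 1))) VA
      = bfsAltGo target cand fuelB VB F d := by
  intro fuelB
  induction fuelB with
  | zero =>
    intro fuelA n1 m q2 VA VB F d _ _ _ _ _ _ _ _ _ h1 _
    omega
  | succ fb ihB =>
    intro fuelA n1 m q2 VA VB F d hF hnd1 hVA hndq2 hq2 hFV htm htVB hfA _ hfB2
    exact midlevel_inner target primes cand hcand fb ihB
      n1 m q2 VA fuelA VB F d hF hnd1 hVA hndq2 hq2 hFV htm htVB hfA hfB2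

-- ===== VERDICT (by name: the statement is the Claim_ definition above) =====
theorem bfs_spec : Claim_equal_bfs := by
  intro start target primes _hdom
  unfold Spec_bfs bfs bfs_alt
  have hofl : PySem.Set.ofList [start] = [start] := rfl
  rw [hofl]
  have hcand : ∀ b, b ∈ primes.filter (fun p => decide (1000 ≤ p) && decide (p < 10000))
      ↔ (b ∈ primes ∧ 1000 ≤ b ∧ b < 10000) := by
    intro b; simp [List.mem_filter]
  have hlen : (primes.filter (fun p => decide (1000 ≤ p) && decide (p < 10000))).length
      ≤ primes.length := List.length_filter_le _ _
  have hun := unseen_le_length (primes.filter (fun p => decide (1000 ≤ p) && decide (p < 10000))) [start]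
  have h := midlevel target primes (primes.filter (fun p => decide (1000 ≤ p) && decide (p < 10000)))
    hcand (primes.length + 3) (primes.length + 2) [start] [] [] [start] [start] [start] 0
    (fun z => by simp)
    (List.nodup_cons.mpr ⟨List.not_mem_nil, List.nodup_nil⟩)
    (fun z => by simp)
    List.nodup_nil
    (fun b => by simp)
    (fun z hz => hz)
    (List.not_mem_nil)
    (fun h => h)
    (by simpa using by omega)
    (by omega)
    (fun _ => by omega)
  simpa using h
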